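-- pv_equiv track=rewrite | github.com/RobarePruyn/OUI-Crawler | netcaster_engine/mac_utils.py | mac_matches_oui
-- ===== SOURCE A (Python) =====
-- from typing import Optional
--
-- def mac_matches_oui(mac_cisco: str, normalized_oui_list: list[str]) -> Optional[str]:
--     """
--     Check if a Cisco-format MAC matches any OUI prefix in the list.
--     Returns the longest (most specific) matched OUI string if found,
--     None otherwise.  Longest-prefix-match: e4:30:22:b8 beats e4:30:22.
--     """
--     mac_hex = mac_cisco.replace('.', '')
--     best_match: Optional[str] = None
--     best_len = 0
--     for oui_prefix in normalized_oui_list: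
--         if mac_hex.startswith(oui_prefix) and len(oui_prefix) > best_len:
--             best_match = oui_prefix
--             best_len = len(oui_prefix)
--     return best_match
-- ===== SOURCE B (Python) =====
-- from typing import Optional
--
-- def mac_matches_oui(mac_cisco: str, normalized_oui_list: list[str]) -> Optional[str]:
--     mac_hex = mac_cisco.replace('.', '')
--     prefixes = set(normalized_oui_list)
--     lengths = sorted({len(p) for p in prefixes}, reverse=True)
--     for length in lengths:
--         if 0 < length <= len(mac_hex) and mac_hex[:length] in prefixes:
--             return mac_hex[:length]
--     return None
-- ===== Notes on version B (the rewrite author's own statement) =====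
-- stated objective: alternative
-- what changed: Instead of scanning every OUI list entry with startswith and keeping the longest hit, B builds a set of the OUI strings once and probes the candidate prefixes mac_hex[:length] against it for each distinct OUI length in descending order, returning the first hit (the longest match).
import Mathlib
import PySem

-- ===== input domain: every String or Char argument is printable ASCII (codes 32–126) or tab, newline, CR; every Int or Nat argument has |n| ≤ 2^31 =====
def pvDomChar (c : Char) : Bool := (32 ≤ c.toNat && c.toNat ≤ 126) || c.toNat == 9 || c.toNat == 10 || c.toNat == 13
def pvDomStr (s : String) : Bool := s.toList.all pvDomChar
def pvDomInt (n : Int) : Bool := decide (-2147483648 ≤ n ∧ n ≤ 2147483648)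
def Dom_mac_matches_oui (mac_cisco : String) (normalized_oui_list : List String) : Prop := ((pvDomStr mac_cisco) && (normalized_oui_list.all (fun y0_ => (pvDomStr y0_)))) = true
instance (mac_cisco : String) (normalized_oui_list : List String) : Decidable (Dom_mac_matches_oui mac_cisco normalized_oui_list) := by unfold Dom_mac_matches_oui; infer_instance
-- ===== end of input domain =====

-- B replaces A's scan over the OUI list (startswith on each entry, keeping the longest hit)
-- with a set of the OUI strings probed by descending candidate-prefix length; objective: alternative.

-- ===== PORT A =====
-- literal port of A: fold over the OUI list carrying (best_match, best_len)
def mac_matches_oui (mac_cisco : String) (normalized_oui_list : List String) : Option String :=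
  let mac_hex := PySem.Str.replace mac_cisco "." ""
  (normalized_oui_list.foldl
    (fun (st : Option String × Int) oui_prefix =>
      if PySem.Str.startswith mac_hex oui_prefix && decide (PySem.Str.len oui_prefix > st.2)
      then (some oui_prefix, PySem.Str.len oui_prefix)
      else st)
    (none, 0)).1

-- ===== PORT B =====
-- literal port of B: set of prefixes, probe mac_hex[:length] for each distinct OUI length, descending
def mac_matches_oui_alt (mac_cisco : String) (normalized_oui_list : List String) : Option String :=
  let mac_hex := PySem.Str.replace mac_cisco "." ""
  let prefixes : PySem.Set String := PySem.Set.ofList normalized_oui_list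
  let lengths := PySem.List.sorted (PySem.Set.ofList (prefixes.map PySem.Str.len)) (fun x => x) true
  lengths.findSome? (fun length =>
    if (0 < length && length ≤ PySem.Str.len mac_hex)
        && prefixes.contains (PySem.Str.slice mac_hex none (some length))
    then some (PySem.Str.slice mac_hex none (some length))
    else none)

-- ===== PRECONDITION & SPEC =====
def Spec_mac_matches_oui (mac_cisco : String) (normalized_oui_list : List String) (out : Option String) : Prop := out = mac_matches_oui_alt mac_cisco normalized_oui_list
instance (mac_cisco : String) (normalized_oui_list : List String) (out : Option String) : Decidable (Spec_mac_matches_oui mac_cisco normalized_oui_list out) := by unfold Spec_mac_matches_oui; infer_instance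

-- ===== CLAIM (what is proved, stated in full; the proofs are below) =====
def Claim_equal_mac_matches_oui : Prop := ∀ (mac_cisco : String) (normalized_oui_list : List String), Dom_mac_matches_oui mac_cisco normalized_oui_list → Spec_mac_matches_oui mac_cisco normalized_oui_list (mac_matches_oui mac_cisco normalized_oui_list)

-- ===== LEMMAS AND PROOFS =====

-- A's running maximum of matching prefix lengths, starting from m
def pvBestLen (hex : String) (l : List String) (m : Int) : Int :=
  l.foldl (fun m p => if PySem.Str.startswith hex p && decide (PySem.Str.len p > m) then PySem.Str.len p else m) m

theorem pvBestLen_cons (hex : String) (p : String) (l : List String) (m : Int) :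
    pvBestLen hex (p :: l) m =
      pvBestLen hex l (if PySem.Str.startswith hex p && decide (PySem.Str.len p > m) then PySem.Str.len p else m) := rfl

theorem pvBestLen_ge (hex : String) (l : List String) (m : Int) : m ≤ pvBestLen hex l m := by
  induction l generalizing m with
  | nil => simp [pvBestLen]
  | cons p l ih =>
    rw [pvBestLen_cons]
    split_ifs with h
    · have := ih (PySem.Str.len p)
      simp only [Bool.and_eq_true, decide_eq_true_eq] at h
      omega
    · exact ih m

theorem pvBestLen_ub (hex : String) (l : List String) (m : Int) :
    ∀ p ∈ l, PySem.Str.startswith hex p = true → PySem.Str.len p ≤ pvBestLen hex l m := by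
  induction l generalizing m with
  | nil => simp
  | cons q l ih =>
    intro p hp hsw
    rw [pvBestLen_cons]
    rcases List.mem_cons.mp hp with rfl | hp
    · split_ifs with h
      · exact pvBestLen_ge hex l _
      · simp only [hsw, Bool.true_and, decide_eq_true_eq, not_lt] at h
        exact le_trans h (pvBestLen_ge hex l m)
    · exact ih _ p hp hsw

theorem pvBestLen_wit (hex : String) (l : List String) (m : Int) :
    pvBestLen hex l m = m ∨
      ∃ p ∈ l, PySem.Str.startswith hex p = true ∧ PySem.Str.len p = pvBestLen hex l m := by
  induction l generalizing m with
  | nil => left; rfl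
  | cons q l ih =>
    rw [pvBestLen_cons]
    split_ifs with h
    · right
      rcases ih (PySem.Str.len q) with heq | ⟨p, hp, hsw, hlen⟩
      · exact ⟨q, List.mem_cons_self, (Bool.and_eq_true .. ▸ h).1, heq.symm⟩
      · exact ⟨p, List.mem_cons_of_mem _ hp, hsw, hlen⟩
    · rcases ih m with heq | ⟨p, hp, hsw, hlen⟩
      · exact Or.inl heq
      · exact Or.inr ⟨p, List.mem_cons_of_mem _ hp, hsw, hlen⟩

-- matching prefixes of hex ARE the slices hex[:len p]
theorem pv_match_eq_slice (hex p : String) (hsw : PySem.Str.startswith hex p = true) :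
    p = PySem.Str.slice hex none (some (PySem.Str.len p)) := by
  apply String.toList_inj.mp
  rw [PySem.Str.toList_slice, PySem.Chars.slice_eq_listSlice, PySem.Str.len_eq,
    PySem.List.slice_to _ (by positivity), Int.toNat_natCast]
  rw [PySem.Str.startswith_eq, PySem.Chars.startswith_iff] at hsw
  exact List.prefix_iff_eq_take.mp hsw

theorem pv_len_le (hex p : String) (hsw : PySem.Str.startswith hex p = true) :
    PySem.Str.len p ≤ PySem.Str.len hex := by
  rw [PySem.Str.startswith_eq, PySem.Chars.startswith_iff] at hsw
  have := hsw.length_le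
  simp only [PySem.Str.len_eq]
  exact_mod_cast this

theorem pv_slice_sw (hex : String) (x : Int) (hx : 0 ≤ x) :
    PySem.Str.startswith hex (PySem.Str.slice hex none (some x)) = true := by
  rw [PySem.Str.startswith_eq, PySem.Chars.startswith_iff, PySem.Str.toList_slice,
    PySem.Chars.slice_eq_listSlice, PySem.List.slice_to _ hx]
  exact List.take_prefix _ _

theorem pv_slice_len (hex : String) (x : Int) (h0 : 0 ≤ x) (hn : x ≤ PySem.Str.len hex) :
    PySem.Str.len (PySem.Str.slice hex none (some x)) = x := by
  rw [PySem.Str.len_eq] at hn ⊢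
  rw [PySem.Str.toList_slice, PySem.Chars.slice_eq_listSlice, PySem.List.slice_to _ h0,
    List.length_take]
  omega

-- A's fold, first component
theorem pv_fold_fst (hex : String) (l : List String) :
    ∀ (b : Option String) (m : Int), 0 ≤ m →
      (l.foldl
        (fun (st : Option String × Int) p =>
          if PySem.Str.startswith hex p && decide (PySem.Str.len p > st.2)
          then (some p, PySem.Str.len p) else st) (b, m)).1 =
      if pvBestLen hex l m > m
      then some (PySem.Str.slice hex none (some (pvBestLen hex l m)))
      else b := by
  induction l with
  | nil => intro b m _; simp [pvBestLen]
  | cons p l ih =>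
    intro b m hm
    rw [List.foldl_cons, pvBestLen_cons]
    by_cases h : (PySem.Str.startswith hex p && decide (PySem.Str.len p > m)) = true
    · rw [if_pos h, if_pos h]
      obtain ⟨hsw, hgt⟩ := Bool.and_eq_true .. ▸ h
      rw [decide_eq_true_eq] at hgt
      rw [ih (some p) (PySem.Str.len p) (by omega)]
      have hge := pvBestLen_ge hex l (PySem.Str.len p)
      by_cases h2 : pvBestLen hex l (PySem.Str.len p) > PySem.Str.len p
      · rw [if_pos h2, if_pos (by omega)]
      · have heq : pvBestLen hex l (PySem.Str.len p) = PySem.Str.len p := by omega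
        rw [if_neg h2, if_pos (by omega), heq, ← pv_match_eq_slice hex p hsw]
    · rw [if_neg h, if_neg h]
      exact ih b m hm

-- findSome? over a strictly descending list: the hit at the largest satisfying value wins
theorem pv_findSome_strictDesc {α : Type} (f : Int → Option α) (v : α) :
    ∀ (D : List Int), D.Pairwise (fun a b => b < a) → ∀ L : Int, L ∈ D →
      (∀ x ∈ D, L < x → f x = none) → f L = some v → D.findSome? f = some v := by
  intro D
  induction D with
  | nil => simp
  | cons d t ih =>
    intro hD L hmem hnone hv
    rcases List.mem_cons.mp hmem with rfl | hmem
    · rw [List.findSome?_cons, hv]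
    · have hlt : L < d := (List.pairwise_cons.mp hD).1 L hmem
      rw [List.findSome?_cons, hnone d List.mem_cons_self hlt]
      exact ih (List.pairwise_cons.mp hD).2 L hmem
        (fun x hx h => hnone x (List.mem_cons_of_mem _ hx) h) hv

-- ===== VERDICT (by name: the statement is the Claim_ definition above) =====
theorem pv_findSome_none {α β : Type} (f : α → Option β) (l : List α)
    (h : ∀ x ∈ l, f x = none) : l.findSome? f = none := by
  induction l with
  | nil => rfl
  | cons d t ih =>
    rw [List.findSome?_cons, h d List.mem_cons_self]
    exact ih (fun x hx => h x (List.mem_cons_of_mem _ hx))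

theorem mac_matches_oui_spec : Claim_equal_mac_matches_oui := by
  intro mac ouis _
  unfold Spec_mac_matches_oui mac_matches_oui mac_matches_oui_alt
  simp only []
  set hex := PySem.Str.replace mac "." "" with hhex
  rw [pv_fold_fst hex ouis none 0 le_rfl]
  set L := pvBestLen hex ouis 0 with hL
  have hL0 : 0 ≤ L := pvBestLen_ge hex ouis 0
  set prefixes : PySem.Set String := PySem.Set.ofList ouis with hpre
  set D := PySem.List.sorted (PySem.Set.ofList (prefixes.map PySem.Str.len)) (fun x => x) true
    with hD
  have hdesc : D.Pairwise (fun a b => b < a) := by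
    have h1 : D.Pairwise (fun a b => b ≤ a) := PySem.List.sorted_pairwise_rev _ _
    have h2 : D.Nodup :=
      ((PySem.List.sorted_perm _ _ _).nodup_iff).mpr (PySem.Set.nodup_ofList _)
    exact (h2.and h1).imp (fun {a b} h => lt_of_le_of_ne h.2 (Ne.symm h.1))
  have hmemD : ∀ x : Int, x ∈ D ↔ ∃ p ∈ ouis, PySem.Str.len p = x := by
    intro x
    rw [hD, PySem.List.mem_sorted, PySem.Set.mem_ofList, List.mem_map]
    constructor
    · rintro ⟨p, hp, rfl⟩
      exact ⟨p, (PySem.Set.mem_ofList _ _).mp hp, rfl⟩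
    · rintro ⟨p, hp, rfl⟩
      exact ⟨p, (PySem.Set.mem_ofList _ _).mpr hp, rfl⟩
  have hcond_false : ∀ x : Int, L < x →
      ((0 < x && x ≤ PySem.Str.len hex)
        && prefixes.contains (PySem.Str.slice hex none (some x))) = false := by
    intro x hx
    by_cases hxn : x ≤ PySem.Str.len hex
    · rw [Bool.and_eq_false_iff]
      right
      rw [Bool.eq_false_iff]
      intro hc
      have hmem : PySem.Str.slice hex none (some x) ∈ ouis :=
        (PySem.Set.mem_ofList _ _).mp (List.contains_iff_mem.mp hc)
      have hub := pvBestLen_ub hex ouis 0 _ hmem (pv_slice_sw hex x (by omega))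
      rw [pv_slice_len hex x (by omega) hxn] at hub
      omega
    · have hd : decide (x ≤ PySem.Str.len hex) = false := by
        rw [decide_eq_false_iff_not]; exact hxn
      rw [hd, Bool.and_false, Bool.false_and]
  by_cases hpos : L > 0
  · -- some matching prefix exists; both sides return hex[:L]
    rw [if_pos hpos]
    rcases pvBestLen_wit hex ouis 0 with heq | ⟨p, hp, hsw, hlen⟩
    · omega
    have hLle : L ≤ PySem.Str.len hex := by have := pv_len_le hex p hsw; omega
    refine (pv_findSome_strictDesc _ _ D hdesc L ((hmemD L).mpr ⟨p, hp, hlen⟩) ?_ ?_).symm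
    · intro x _ hx
      rw [hcond_false x hx]
      rfl
    · have hps : p = PySem.Str.slice hex none (some L) := by
        have h := pv_match_eq_slice hex p hsw
        rwa [hlen] at h
      have hc : prefixes.contains (PySem.Str.slice hex none (some L)) = true := by
        rw [← hps]
        exact List.contains_iff_mem.mpr ((PySem.Set.mem_ofList _ _).mpr hp)
      rw [if_pos (by simp only [Bool.and_eq_true, decide_eq_true_eq]; exact ⟨⟨hpos, hLle⟩, hc⟩)]
  · -- no matching prefix: both sides return none
    have hLz : L = 0 := by omega
    rw [if_neg hpos]
    refine (pv_findSome_none _ D ?_).symm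
    intro x _
    by_cases h0 : 0 < x
    · rw [hcond_false x (by omega)]
      rfl
    · have hd : decide (0 < x) = false := by
        rw [decide_eq_false_iff_not]; exact h0
      rw [hd, Bool.false_and, Bool.false_and]
      rfl
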